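-- pv_equiv track=rewrite | github.com/luizrennocosta/comp1ufrj | listas/lista1/submissions/121187753_lista1.py | questao1
-- ===== SOURCE A (Python) =====
-- def questao1(n, ar):
--     contagem_cores = {}
--     for cor in ar:
--         if cor in contagem_cores:
--             contagem_cores[cor] += 1
--         else:
--             contagem_cores[cor] = 1
--     contagem_pares = 0
--     for contagem in contagem_cores.values():
--         contagem_pares += contagem // 2
--     return contagem_pares
-- ===== SOURCE B (Python) =====
-- def questao1(n, ar):
--     # One pass with a parity set: a color toggles in/out of `unpaired`;
--     # each time a color is seen while already unpaired, one pair is completed.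
--     pares = 0
--     unpaired = set()
--     for cor in ar:
--         if cor in unpaired:
--             unpaired.remove(cor)
--             pares += 1
--         else:
--             unpaired.add(cor)
--     return pares
-- ===== Notes on version B (the rewrite author's own statement) =====
-- stated objective: alternative
-- what changed: Replaces the two-phase frequency dictionary (count all colors, then sum count//2 over the values) with a single pass that toggles each color in a parity set and counts a pair whenever a color is seen while already unpaired; no dictionary and no division.
import Mathlib
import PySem

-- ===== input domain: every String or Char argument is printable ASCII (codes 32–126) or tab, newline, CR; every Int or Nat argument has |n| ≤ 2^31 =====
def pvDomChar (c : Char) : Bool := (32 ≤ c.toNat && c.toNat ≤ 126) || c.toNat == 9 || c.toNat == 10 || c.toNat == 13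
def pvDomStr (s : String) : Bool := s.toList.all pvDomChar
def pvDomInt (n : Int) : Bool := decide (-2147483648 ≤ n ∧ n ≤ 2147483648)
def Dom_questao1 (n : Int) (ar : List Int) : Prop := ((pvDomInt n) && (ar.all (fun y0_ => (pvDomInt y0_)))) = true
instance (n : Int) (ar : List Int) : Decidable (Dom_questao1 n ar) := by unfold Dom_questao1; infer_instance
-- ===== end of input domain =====

-- B replaces A's frequency dictionary + sum of count//2 with a single pass toggling
-- each color in a parity set and counting completed pairs (objective: alternative).

-- ===== PORT A =====
-- dict counting loop, then sum of value // 2 over the dict's values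
def questao1 (n : Int) (ar : List Int) : Int :=
  let contagem_cores : PySem.Dict Int Int :=
    ar.foldl (fun d cor =>
      if d.contains cor then d.insert cor (d.getD cor 0 + 1) else d.insert cor 1)
      PySem.Dict.empty
  contagem_cores.values.foldl (fun acc contagem => acc + PySem.Int.floordiv contagem 2) 0

-- ===== PORT B =====
-- single pass: state = (unpaired parity set, pares). Python's `unpaired.remove(cor)` is
-- executed only when `cor in unpaired`, where it equals PySem.Set.discard (no KeyError).
def questao1_alt (n : Int) (ar : List Int) : Int :=
  (ar.foldl (fun (st : PySem.Set Int × Int) cor =>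
      if st.1.contains cor then (st.1.discard cor, st.2 + 1) else (st.1.add cor, st.2))
    (PySem.Set.empty, 0)).2

-- ===== PRECONDITION & SPEC =====
def Spec_questao1 (n : Int) (ar : List Int) (out : Int) : Prop := out = questao1_alt n ar
instance (n : Int) (ar : List Int) (out : Int) : Decidable (Spec_questao1 n ar out) := by unfold Spec_questao1; infer_instance

-- ===== CLAIM (what is proved, stated in full; the proofs are below) =====
def Claim_equal_questao1 : Prop := ∀ (n : Int) (ar : List Int), Dom_questao1 n ar → Spec_questao1 n ar (questao1 n ar)

-- ===== LEMMAS AND PROOFS =====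

-- B's one step
def pvStepB (st : PySem.Set Int × Int) (cor : Int) : PySem.Set Int × Int :=
  if st.1.contains cor then (st.1.discard cor, st.2 + 1) else (st.1.add cor, st.2)

-- the pair count both programs compute: ∑ over distinct colors of (count // 2)
def pvPairs (l : List Int) : Int :=
  ((PySem.Set.ofList l).map (fun k => ((l.count k / 2 : Nat) : Int))).sum

-- sums of two maps over a list without duplicates differ only by the difference at one member
lemma pv_sum_map_update (l : List Int) (hnd : l.Nodup) (x : Int) (hx : x ∈ l)
    (f g : Int → Int) (hfg : ∀ k, k ≠ x → f k = g k) :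
    (l.map f).sum = (l.map g).sum + (f x - g x) := by
  induction l with
  | nil => cases hx
  | cons a t ih =>
    simp only [List.map_cons, List.sum_cons]
    rcases List.mem_cons.mp hx with rfl | hxt
    · have : ∀ k ∈ t, f k = g k := by
        intro k hk; exact hfg k (fun h => (List.nodup_cons.mp hnd).1 (h ▸ hk))
      rw [List.map_congr_left this]; ring
    · have hax : a ≠ x := fun h => (List.nodup_cons.mp hnd).1 (h ▸ hxt)
      rw [hfg a hax, ih (List.nodup_cons.mp hnd).2 hxt]; ring

-- loop invariant of B's fold: the set holds the odd-count colors, pares = pvPairs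
lemma pvB_invariant (l : List Int) :
    (∀ k : Int, k ∈ (l.foldl pvStepB (PySem.Set.empty, 0)).1 ↔ l.count k % 2 = 1) ∧
    (l.foldl pvStepB (PySem.Set.empty, 0)).2 = pvPairs l := by
  induction l using List.reverseRecOn with
  | nil =>
    constructor
    · intro k; simp [PySem.Set.empty]
    · simp [pvPairs, PySem.Set.ofList_nil]
  | append_singleton t x ih =>
    obtain ⟨hmem, hsum⟩ := ih
    rw [List.foldl_append]
    set st := t.foldl pvStepB (PySem.Set.empty, 0) with hst
    have hnd : (PySem.Set.ofList t).Nodup := PySem.Set.nodup_ofList t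
    by_cases hx : x ∈ st.1
    · -- x has odd count in t: remove it, complete a pair
      have hodd : t.count x % 2 = 1 := (hmem x).mp hx
      have hxc : st.1.contains x = true := (PySem.Set.contains_iff _ _).mpr hx
      have hxt : x ∈ t := List.count_pos_iff.mp (by omega)
      have hset : PySem.Set.ofList (t ++ [x]) = PySem.Set.ofList t := by
        rw [PySem.Set.ofList_append_singleton,
            PySem.Set.add_of_mem ((PySem.Set.mem_ofList t x).mpr hxt)]
      constructor
      · intro k
        simp only [List.foldl_cons, List.foldl_nil, pvStepB, hxc, ite_true]
        rw [PySem.Set.mem_discard, hmem k]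
        rcases eq_or_ne k x with rfl | hk
        · simp [List.count_append]; omega
        · simp [List.count_append, hk, Ne.symm hk]
      · simp only [List.foldl_cons, List.foldl_nil, pvStepB, hxc, ite_true]
        rw [hsum]
        unfold pvPairs
        rw [hset, pv_sum_map_update (PySem.Set.ofList t) hnd x
              ((PySem.Set.mem_ofList t x).mpr hxt)
              (fun k => (((t ++ [x]).count k / 2 : Nat) : Int))
              (fun k => ((t.count k / 2 : Nat) : Int))
              (by intro k hk; simp [List.count_append, Ne.symm hk])]
        have : (t ++ [x]).count x = t.count x + 1 := by
          simp [List.count_append]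
        rw [this]
        have h2 : (t.count x + 1) / 2 = t.count x / 2 + 1 := by omega
        rw [h2]; push_cast; ring
    · -- x has even count in t: add it to the set, no new pair
      have hnodd : ¬ t.count x % 2 = 1 := fun h => hx ((hmem x).mpr h)
      have heven : t.count x % 2 = 0 := by omega
      have hxc : st.1.contains x = false := by
        cases h : st.1.contains x
        · rfl
        · exact absurd ((PySem.Set.contains_iff _ _).mp h) hx
      constructor
      · intro k
        simp only [List.foldl_cons, List.foldl_nil, pvStepB, hxc, Bool.false_eq_true, ite_false]
        rw [PySem.Set.mem_add, hmem k]
        rcases eq_or_ne k x with rfl | hk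
        · simp [List.count_append]; omega
        · simp [List.count_append, hk, Ne.symm hk]
      · simp only [List.foldl_cons, List.foldl_nil, pvStepB, hxc, Bool.false_eq_true, ite_false]
        rw [hsum]
        unfold pvPairs
        by_cases hxt : x ∈ t
        · have hset : PySem.Set.ofList (t ++ [x]) = PySem.Set.ofList t := by
            rw [PySem.Set.ofList_append_singleton,
                PySem.Set.add_of_mem ((PySem.Set.mem_ofList t x).mpr hxt)]
          rw [hset, pv_sum_map_update (PySem.Set.ofList t) hnd x
                ((PySem.Set.mem_ofList t x).mpr hxt)
                (fun k => (((t ++ [x]).count k / 2 : Nat) : Int))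
                (fun k => ((t.count k / 2 : Nat) : Int))
                (by intro k hk; simp [List.count_append, Ne.symm hk])]
          have : (t ++ [x]).count x = t.count x + 1 := by simp [List.count_append]
          rw [this]
          have h2 : (t.count x + 1) / 2 = t.count x / 2 := by omega
          rw [h2]; ring
        · have hc0 : t.count x = 0 := List.count_eq_zero.mpr hxt
          have hset : PySem.Set.ofList (t ++ [x]) = PySem.Set.ofList t ++ [x] := by
            rw [PySem.Set.ofList_append_singleton,
                PySem.Set.add_of_not_mem (fun h => hxt ((PySem.Set.mem_ofList t x).mp h))]
          rw [hset, List.map_append, List.sum_append]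
          have hterms : ∀ k ∈ PySem.Set.ofList t,
              (((t ++ [x]).count k / 2 : Nat) : Int) = ((t.count k / 2 : Nat) : Int) := by
            intro k hk
            have hk' : k ≠ x := fun h => hxt (h ▸ (PySem.Set.mem_ofList t k).mp hk)
            simp [List.count_append, Ne.symm hk']
          rw [List.map_congr_left hterms]
          have : (t ++ [x]).count x = 1 := by simp [List.count_append, hc0]
          simp [hc0]

-- A's counting loop is exactly the Counter-building fold
lemma pvA_eq_counter (ar : List Int) :
    ar.foldl (fun d cor =>
      if d.contains cor then d.insert cor (d.getD cor 0 + 1) else d.insert cor 1)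
      PySem.Dict.empty = PySem.Dict.counter ar := by
  rw [← PySem.Dict.foldl_insert_getD_add_one_eq_counter]
  congr 1
  funext d cor
  by_cases h : d.contains cor
  · simp [h]
  · have h' : d.contains cor = false := by simpa using h
    simp [h', PySem.Dict.getD_of_not_contains d 0 h']

-- A sums count // 2 over the distinct colors
lemma pvA_eq_pvPairs (n : Int) (ar : List Int) : questao1 n ar = pvPairs ar := by
  unfold questao1
  rw [pvA_eq_counter, PySem.List.foldl_add]
  have hv : (PySem.Dict.counter ar).values
      = (PySem.Set.ofList ar).map (fun k => ((ar.count k : Int))) := by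
    simp only [PySem.Dict.values, PySem.Dict.items_counter, List.map_map]
    rfl
  rw [hv, List.map_map]
  unfold pvPairs
  have hdiv : ∀ m : Nat, PySem.Int.floordiv (m : Int) 2 = ((m / 2 : Nat) : Int) := by
    intro m; exact_mod_cast PySem.Int.floordiv_natCast m 2
  simp only [Function.comp_def, hdiv, zero_add]

-- ===== VERDICT (by name: the statement is the Claim_ definition above) =====
theorem questao1_spec : Claim_equal_questao1 := by
  intro n ar _
  unfold Spec_questao1
  rw [pvA_eq_pvPairs n ar]
  show pvPairs ar = _
  unfold questao1_alt
  exact ((pvB_invariant ar).2).symm
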